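-- pv_equiv track=rewrite | github.com/lee-gi-tae/algorithm | 프로그래머스/0/181935. 홀짝에 따라 다른 값 반환하기/홀짝에 따라 다른 값 반환하기.py | solution
-- ===== SOURCE A (Python) =====
-- def solution(n):
--     answer = 0
--     for i in range(n+1):
--         if n % 2 == 0:
--             if i % 2 == 0:
--                 answer += i * i
--         else:
--             if i % 2 == 1:
--                 answer += i
--     return answer
-- ===== SOURCE B (Python) =====
-- def solution(n):
--     if n < 0:
--         return 0
--     if n % 2 == 0:
--         m = n // 2
--         return 2 * m * (m + 1) * (2 * m + 1) // 3
--     m = (n + 1) // 2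
--     return m * m
-- ===== Notes on version B (the rewrite author's own statement) =====
-- stated objective: faster
-- what changed: Replaced the O(n) loop over range(n+1) with closed-form arithmetic-series formulas for the sum of even squares and the sum of odd numbers.
import Mathlib
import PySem

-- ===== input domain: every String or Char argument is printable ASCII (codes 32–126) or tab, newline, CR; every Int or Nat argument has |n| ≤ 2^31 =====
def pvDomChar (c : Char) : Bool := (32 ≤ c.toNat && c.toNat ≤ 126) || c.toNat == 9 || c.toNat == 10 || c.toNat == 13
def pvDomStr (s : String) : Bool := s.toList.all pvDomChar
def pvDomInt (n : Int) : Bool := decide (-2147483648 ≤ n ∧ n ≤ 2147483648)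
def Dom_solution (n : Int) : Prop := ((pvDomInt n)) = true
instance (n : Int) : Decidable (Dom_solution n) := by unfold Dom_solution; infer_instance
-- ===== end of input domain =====

-- B replaces A's O(n) loop by closed-form series formulas (asymptotically faster).

-- ===== PORT A =====
def solution (n : Int) : Int :=
  (PySem.List.pyRange 0 (n + 1) 1).foldl
    (fun answer i =>
      if PySem.Int.mod n 2 = 0 then
        if PySem.Int.mod i 2 = 0 then answer + i * i else answer
      else
        if PySem.Int.mod i 2 = 1 then answer + i else answer)
    0

-- ===== PORT B =====
def solution_alt (n : Int) : Int :=
  if n < 0 then 0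
  else if PySem.Int.mod n 2 = 0 then
    let m := PySem.Int.floordiv n 2
    PySem.Int.floordiv (2 * m * (m + 1) * (2 * m + 1)) 3
  else
    let m := PySem.Int.floordiv (n + 1) 2
    m * m

-- ===== PRECONDITION & SPEC =====
def Spec_solution (n : Int) (out : Int) : Prop := out = solution_alt n
instance (n : Int) (out : Int) : Decidable (Spec_solution n out) := by unfold Spec_solution; infer_instance

-- ===== CLAIM (what is proved, stated in full; the proofs are below) =====
def Claim_equal_solution : Prop := ∀ (n : Int), Dom_solution n → Spec_solution n (solution n)

-- ===== LEMMAS AND PROOFS =====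

theorem even_loop3 (m : Nat) :
    3 * ((PySem.List.pyRange 0 (2 * (m : Int) + 1) 1).foldl
      (fun answer i => if PySem.Int.mod i 2 = 0 then answer + i * i else answer) 0)
    = 2 * m * (m + 1) * (2 * m + 1) := by
  induction m with
  | zero => decide
  | succ k ih =>
    have h1 : (2 * ((k : Int) + 1) + 1) = (2 * (k : Int) + 1) + 1 + 1 := by ring
    push_cast
    rw [h1, PySem.List.pyRange_one_succ_right (by positivity),
        PySem.List.pyRange_one_succ_right (by positivity), List.foldl_append, List.foldl_append]
    have hm1 : PySem.Int.mod (2 * (k : Int) + 1) 2 = 1 := by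
      rw [PySem.Int.mod_eq_emod_of_pos (by norm_num)]; omega
    have hm2 : PySem.Int.mod (2 * (k : Int) + 1 + 1) 2 = 0 := by
      rw [PySem.Int.mod_eq_emod_of_pos (by norm_num)]; omega
    simp only [List.foldl_cons, List.foldl_nil, hm1, hm2, one_ne_zero, if_true, if_false]
    push_cast at ih
    linear_combination ih

theorem odd_loop (m : Nat) :
    (PySem.List.pyRange 0 (2 * (m : Int) + 2) 1).foldl
      (fun answer i => if PySem.Int.mod i 2 = 1 then answer + i else answer) 0
    = ((m : Int) + 1) * ((m : Int) + 1) := by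
  induction m with
  | zero => decide
  | succ k ih =>
    have h1 : (2 * ((k : Int) + 1) + 2) = (2 * (k : Int) + 2) + 1 + 1 := by ring
    push_cast
    rw [h1, PySem.List.pyRange_one_succ_right (by positivity),
        PySem.List.pyRange_one_succ_right (by positivity), List.foldl_append, List.foldl_append]
    have hm1 : PySem.Int.mod (2 * (k : Int) + 2) 2 = 0 := by
      rw [PySem.Int.mod_eq_emod_of_pos (by norm_num)]; omega
    have hm2 : PySem.Int.mod (2 * (k : Int) + 2 + 1) 2 = 1 := by
      rw [PySem.Int.mod_eq_emod_of_pos (by norm_num)]; omega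
    simp only [List.foldl_cons, List.foldl_nil, hm1, hm2, zero_ne_one, if_true, if_false]
    push_cast at ih
    linear_combination ih

-- ===== VERDICT (by name: the statement is the Claim_ definition above) =====
theorem solution_spec : Claim_equal_solution := by
  intro n _
  unfold Spec_solution solution solution_alt
  by_cases hn : n < 0
  · rw [PySem.List.pyRange_one_eq_nil (by omega)]
    simp [hn]
  · rw [not_lt] at hn
    rcases Int.even_or_odd n with ⟨m, hm⟩ | ⟨m, hm⟩
    · -- n = 2m, m ≥ 0
      have hm0 : 0 ≤ m := by omega
      obtain ⟨k, rfl⟩ := Int.eq_ofNat_of_zero_le hm0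
      have hmod : PySem.Int.mod n 2 = 0 := by
        rw [PySem.Int.mod_eq_emod_of_pos (by norm_num)]; omega
      have hdiv : PySem.Int.floordiv n 2 = (k : Int) := by
        rw [PySem.Int.floordiv_eq_ediv_of_pos (by norm_num)]; omega
      simp only [hmod, if_neg (not_lt.mpr hn), hdiv, if_true]
      have hrange : n + 1 = 2 * (k : Int) + 1 := by omega
      rw [hrange]
      have h3 := even_loop3 k
      have hdvd : PySem.Int.floordiv (2 * (k : Int) * ((k : Int) + 1) * (2 * (k : Int) + 1)) 3
          = (PySem.List.pyRange 0 (2 * (k : Int) + 1) 1).foldl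
              (fun answer i => if PySem.Int.mod i 2 = 0 then answer + i * i else answer) 0 := by
        rw [PySem.Int.floordiv_eq_ediv_of_pos (by norm_num), ← h3,
            Int.mul_ediv_cancel_left _ (by norm_num)]
      rw [hdvd]
    · -- n = 2m+1, m ≥ 0
      have hm0 : 0 ≤ m := by omega
      obtain ⟨k, rfl⟩ := Int.eq_ofNat_of_zero_le hm0
      have hmod : PySem.Int.mod n 2 = 1 := by
        rw [PySem.Int.mod_eq_emod_of_pos (by norm_num)]; omega
      have hdiv : PySem.Int.floordiv (n + 1) 2 = (k : Int) + 1 := by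
        rw [PySem.Int.floordiv_eq_ediv_of_pos (by norm_num)]; omega
      simp only [hmod, if_neg (not_lt.mpr hn), hdiv, one_ne_zero, if_false]
      have hrange : n + 1 = 2 * (k : Int) + 2 := by omega
      rw [hrange, odd_loop k]
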